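-- pv_equiv track=rewrite | github.com/krystianbajno/encode-tools | encoder.py | math_unicode_script_encode
-- ===== SOURCE A (Python) =====
-- def math_unicode_script_encode(s):
--     """Mathematical Script Unicode"""
--     # Script uppercase: U+1D49C-U+1D4B5, lowercase: U+1D4B6-U+1D4CF
--     result = ''
--     for c in s:
--         if 'A' <= c <= 'Z':
--             result += chr(0x1D49C + (ord(c) - ord('A')))
--         elif 'a' <= c <= 'z':
--             result += chr(0x1D4B6 + (ord(c) - ord('a')))
--         else:
--             result += c
--     return result
-- ===== SOURCE B (Python) =====
-- def math_unicode_script_encode(s):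
--     """Mathematical Script Unicode"""
--     # 26 staged whole-string passes: pair i rewrites the i-th upper- and
--     # lowercase letter everywhere.  Order is irrelevant because the script
--     # targets are never sources of a later pass.
--     for i in range(26):
--         s = s.replace(chr(0x41 + i), chr(0x1D49C + i)).replace(chr(0x61 + i), chr(0x1D4B6 + i))
--     return s
-- ===== Notes on version B (the rewrite author's own statement) =====
-- stated objective: alternative
-- what changed: Replaces A's single per-character if/elif accumulator loop with 26 staged whole-string passes, each rewriting one uppercase and one lowercase letter via str.replace; correct because the script targets are never sources of a later pass.
import Mathlib
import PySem

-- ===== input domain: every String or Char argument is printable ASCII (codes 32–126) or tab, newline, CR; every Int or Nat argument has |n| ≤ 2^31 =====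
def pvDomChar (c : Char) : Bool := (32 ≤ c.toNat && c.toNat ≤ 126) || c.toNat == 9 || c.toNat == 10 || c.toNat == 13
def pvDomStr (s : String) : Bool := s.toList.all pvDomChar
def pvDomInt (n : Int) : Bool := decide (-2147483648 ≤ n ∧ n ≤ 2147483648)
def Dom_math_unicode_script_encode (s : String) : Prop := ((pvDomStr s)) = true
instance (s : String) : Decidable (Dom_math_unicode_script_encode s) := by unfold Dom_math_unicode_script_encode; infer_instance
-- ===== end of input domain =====

-- B replaces A's per-character if/elif accumulator loop with 26 staged whole-string str.replace passes (alternative decomposition; return value only).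

-- ===== PORT A =====
-- literal port of A: accumulate the result char by char, branching on the letter ranges
def math_unicode_script_encode (s : String) : String :=
  String.mk (s.toList.foldl (fun result c =>
    result ++ (if 'A' ≤ c ∧ c ≤ 'Z' then [Char.ofNat (0x1D49C + (c.toNat - 'A'.toNat))]
      else if 'a' ≤ c ∧ c ≤ 'z' then [Char.ofNat (0x1D4B6 + (c.toNat - 'a'.toNat))]
      else [c])) [])

-- ===== PORT B =====
-- port of Source B: for i in range(26): s = s.replace(chr(0x41+i), chr(0x1D49C+i)).replace(chr(0x61+i), chr(0x1D4B6+i))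
def math_unicode_script_encode_alt (s : String) : String :=
  String.mk ((List.range 26).foldl (fun cs i =>
    PySem.Chars.replace
      (PySem.Chars.replace cs [Char.ofNat (0x41 + i)] [Char.ofNat (0x1D49C + i)])
      [Char.ofNat (0x61 + i)] [Char.ofNat (0x1D4B6 + i)]) s.toList)

-- ===== PRECONDITION & SPEC =====
def Spec_math_unicode_script_encode (s : String) (out : String) : Prop := out = math_unicode_script_encode_alt s
instance (s : String) (out : String) : Decidable (Spec_math_unicode_script_encode s out) := by unfold Spec_math_unicode_script_encode; infer_instance

-- ===== CLAIM (what is proved, stated in full; the proofs are below) =====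
def Claim_equal_math_unicode_script_encode : Prop := ∀ (s : String), Dom_math_unicode_script_encode s → Spec_math_unicode_script_encode s (math_unicode_script_encode s)

-- ===== LEMMAS AND PROOFS =====

lemma char_eq_of_toNat (a b : Char) (h : a.toNat = b.toNat) : a = b := by
  apply Char.ext; exact UInt32.toNat_inj.mp h

lemma char_eq_iff_toNat (a b : Char) : a = b ↔ a.toNat = b.toNat :=
  ⟨fun h => h ▸ rfl, char_eq_of_toNat a b⟩

lemma char_le_iff (a c : Char) : a ≤ c ↔ a.toNat ≤ c.toNat := by rfl

lemma toNat_ofNat_valid (n : Nat) (h : n.isValidChar) : (Char.ofNat n).toNat = n := by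
  simp [Char.ofNat, h, Char.toNat, Char.ofNatAux]

lemma toNat_upper (i : Nat) (h : i < 26) : (Char.ofNat (0x41 + i)).toNat = 0x41 + i :=
  toNat_ofNat_valid _ (Or.inl (by omega))

lemma toNat_lower (i : Nat) (h : i < 26) : (Char.ofNat (0x61 + i)).toNat = 0x61 + i :=
  toNat_ofNat_valid _ (Or.inl (by omega))

lemma toNat_scriptU (i : Nat) (h : i < 26) : (Char.ofNat (0x1D49C + i)).toNat = 0x1D49C + i :=
  toNat_ofNat_valid _ (Or.inr ⟨by omega, by omega⟩)

lemma toNat_scriptL (i : Nat) (h : i < 26) : (Char.ofNat (0x1D4B6 + i)).toNat = 0x1D4B6 + i :=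
  toNat_ofNat_valid _ (Or.inr ⟨by omega, by omega⟩)

-- single-character str.replace is a pointwise map
lemma replace_go_single (c d : Char) :
    ∀ (l : List Char) (fuel : Nat) (acc : List Char), l.length ≤ fuel →
      PySem.Chars.replace.go [c] [d] fuel l acc
        = acc.reverse ++ l.map (fun x => if x = c then d else x) := by
  intro l
  induction l with
  | nil =>
    intro fuel acc _
    cases fuel <;> simp [PySem.Chars.replace.go]
  | cons hd t ih =>
    intro fuel acc hle
    cases fuel with
    | zero => simp at hle
    | succ m =>
      have hlen : t.length ≤ m := by simpa using hle
      rw [PySem.Chars.replace.go]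
      by_cases h : hd = c
      · subst h
        rw [if_pos (by simp [List.isPrefixOf])]
        simp only [List.length_singleton, List.drop_succ_cons, List.drop_zero]
        rw [ih m ([d].reverse ++ acc) hlen]
        simp
      · rw [if_neg (by simp only [List.isPrefixOf, Bool.and_true,
          beq_iff_eq]; exact fun hc => h hc.symm)]
        rw [ih m (hd :: acc) hlen]
        simp [h]

lemma replace_single (cs : List Char) (c d : Char) :
    PySem.Chars.replace cs [c] [d] = cs.map (fun x => if x = c then d else x) := by
  rw [PySem.Chars.replace]
  simp only [List.isEmpty_cons, if_false, Bool.false_eq_true]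
  exact (replace_go_single c d cs cs.length [] le_rfl).trans (by simp)

-- a fold of maps is a map of the per-element fold
lemma foldl_map_comm (f : Nat → Char → Char) :
    ∀ (l : List Nat) (cs : List Char),
      l.foldl (fun cs i => cs.map (f i)) cs = cs.map (fun x => l.foldl (fun x i => f i x) x) := by
  intro l
  induction l with
  | nil => simp
  | cons i t ih => intro cs; simp [ih, Function.comp_def]

-- the per-character effect of one pass of B (uppercase replace then lowercase replace)
def bStep (i : Nat) (x : Char) : Char :=
  if (if x = Char.ofNat (0x41 + i) then Char.ofNat (0x1D49C + i) else x) = Char.ofNat (0x61 + i)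
  then Char.ofNat (0x1D4B6 + i)
  else (if x = Char.ofNat (0x41 + i) then Char.ofNat (0x1D49C + i) else x)

-- A's per-character transform
def aStep (x : Char) : Char :=
  if 'A' ≤ x ∧ x ≤ 'Z' then Char.ofNat (0x1D49C + (x.toNat - 'A'.toNat))
  else if 'a' ≤ x ∧ x ≤ 'z' then Char.ofNat (0x1D4B6 + (x.toNat - 'a'.toNat))
  else x

lemma bStep_char (m : Nat) (hm : m < 26) (y : Char) :
    bStep m y = if y.toNat = 0x41 + m then Char.ofNat (0x1D49C + m)
      else if y.toNat = 0x61 + m then Char.ofNat (0x1D4B6 + m) else y := by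
  unfold bStep
  by_cases h1 : y.toNat = 0x41 + m
  · have hy : y = Char.ofNat (0x41 + m) := char_eq_of_toNat _ _ (by rw [h1, toNat_upper m hm])
    rw [if_pos hy,
      if_neg (by rw [char_eq_iff_toNat, toNat_scriptU m hm, toNat_lower m hm]; omega),
      if_pos h1]
  · have hy : y ≠ Char.ofNat (0x41 + m) :=
      fun hc => h1 (by rw [char_eq_iff_toNat, toNat_upper m hm] at hc; exact hc)
    rw [if_neg hy, if_neg h1]
    by_cases h2 : y.toNat = 0x61 + m
    · rw [if_pos (char_eq_of_toNat _ _ (by rw [h2, toNat_lower m hm])), if_pos h2]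
    · rw [if_neg (fun hc => h2 (by rw [char_eq_iff_toNat, toNat_lower m hm] at hc; exact hc)),
        if_neg h2]

-- invariant: after the first k passes, letters with offset < k are mapped, everything else untouched
lemma foldl_bStep (x : Char) :
    ∀ (k : Nat), k ≤ 26 →
      (List.range k).foldl (fun x i => bStep i x) x
        = if 0x41 ≤ x.toNat ∧ x.toNat < 0x41 + k then Char.ofNat (0x1D49C + (x.toNat - 0x41))
          else if 0x61 ≤ x.toNat ∧ x.toNat < 0x61 + k then Char.ofNat (0x1D4B6 + (x.toNat - 0x61))
          else x := by
  intro k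
  induction k with
  | zero =>
    intro _
    simp only [List.range_zero, List.foldl_nil]
    rw [if_neg (by omega), if_neg (by omega)]
  | succ m ih =>
    intro hk
    rw [List.range_succ, List.foldl_append, ih (by omega)]
    simp only [List.foldl_cons, List.foldl_nil]
    by_cases hU : 0x41 ≤ x.toNat ∧ x.toNat < 0x41 + m
    · rw [if_pos hU, bStep_char m (by omega),
        if_neg (by rw [toNat_scriptU (x.toNat - 0x41) (by omega)]; omega),
        if_neg (by rw [toNat_scriptU (x.toNat - 0x41) (by omega)]; omega),
        if_pos (show 0x41 ≤ x.toNat ∧ x.toNat < 0x41 + (m + 1) by omega)]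
    · by_cases hL : 0x61 ≤ x.toNat ∧ x.toNat < 0x61 + m
      · rw [if_neg hU, if_pos hL, bStep_char m (by omega),
          if_neg (by rw [toNat_scriptL (x.toNat - 0x61) (by omega)]; omega),
          if_neg (by rw [toNat_scriptL (x.toNat - 0x61) (by omega)]; omega),
          if_neg (by omega),
          if_pos (show 0x61 ≤ x.toNat ∧ x.toNat < 0x61 + (m + 1) by omega)]
      · rw [if_neg hU, if_neg hL, bStep_char m (by omega)]
        by_cases hxu : x.toNat = 0x41 + m
        · rw [if_pos hxu, if_pos (show 0x41 ≤ x.toNat ∧ x.toNat < 0x41 + (m + 1) by omega)]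
          congr 1; omega
        · by_cases hxl : x.toNat = 0x61 + m
          · rw [if_neg hxu, if_pos hxl, if_neg (by omega),
              if_pos (show 0x61 ≤ x.toNat ∧ x.toNat < 0x61 + (m + 1) by omega)]
            congr 1; omega
          · rw [if_neg hxu, if_neg hxl, if_neg (by omega), if_neg (by omega)]

lemma bStep_eq_aStep (x : Char) :
    (List.range 26).foldl (fun x i => bStep i x) x = aStep x := by
  rw [foldl_bStep x 26 le_rfl]
  unfold aStep
  have eA : 'A'.toNat = 65 := rfl
  have eZ : 'Z'.toNat = 90 := rfl
  have ea : 'a'.toNat = 97 := rfl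
  have ez : 'z'.toNat = 122 := rfl
  have hA : ('A' ≤ x ∧ x ≤ 'Z') ↔ (0x41 ≤ x.toNat ∧ x.toNat < 0x41 + 26) := by
    rw [char_le_iff, char_le_iff, eA, eZ]; omega
  have ha : ('a' ≤ x ∧ x ≤ 'z') ↔ (0x61 ≤ x.toNat ∧ x.toNat < 0x61 + 26) := by
    rw [char_le_iff, char_le_iff, ea, ez]; omega
  simp only [hA, ha, eA, ea]

set_option maxRecDepth 4000 in
theorem math_unicode_script_encode_eq (s : String) :
    math_unicode_script_encode s = math_unicode_script_encode_alt s := by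
  unfold math_unicode_script_encode math_unicode_script_encode_alt
  -- A's fold-with-append is a map of aStep
  have hfun : (fun (result : List Char) c =>
      result ++ (if 'A' ≤ c ∧ c ≤ 'Z' then [Char.ofNat (0x1D49C + (c.toNat - 'A'.toNat))]
        else if 'a' ≤ c ∧ c ≤ 'z' then [Char.ofNat (0x1D4B6 + (c.toNat - 'a'.toNat))]
        else [c]))
      = (fun result c => result ++ [aStep c]) := by
    funext result c; unfold aStep; split_ifs <;> rfl
  rw [hfun, PySem.List.foldl_append_singleton_eq_map]
  -- B's 26 replace passes are 26 maps, i.e. one map of the per-char fold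
  have hB : (fun (cs : List Char) (i : Nat) =>
      PySem.Chars.replace
        (PySem.Chars.replace cs [Char.ofNat (0x41 + i)] [Char.ofNat (0x1D49C + i)])
        [Char.ofNat (0x61 + i)] [Char.ofNat (0x1D4B6 + i)])
      = (fun cs i => cs.map (fun x => bStep i x)) := by
    funext cs i
    rw [replace_single, replace_single, List.map_map]
    rfl
  rw [hB, foldl_map_comm]
  exact congrArg String.mk (List.map_congr_left (fun c _ => (bStep_eq_aStep c).symm))

-- ===== VERDICT (by name: the statement is the Claim_ definition above) =====
theorem math_unicode_script_encode_spec : Claim_equal_math_unicode_script_encode := by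
  intro s _
  exact math_unicode_script_encode_eq s
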